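-- pv_equiv track=rewrite | github.com/yuchanmo/python1_class | 과제/hw1_6a.py | f14
-- ===== SOURCE A (Python) =====
-- def f14(rows,cols):
--     outerarray = []
--     for r in range(rows):
--         innerarray = []
--         for c in range(cols):
--             cnt = 0
--             for i in [-1,1]:
--                 if r + i >= 0 and r + i < rows:
--                     cnt += 1
--                 if c + i >= 0 and c + i < cols:
--                     cnt += 1
--             innerarray.append(cnt)
--         outerarray.append(innerarray)
--     return outerarray
-- ===== SOURCE B (Python) =====
-- def f14(rows, cols):
--     if rows <= 0:
--         return []
--     row_deg = [(1 if r > 0 else 0) + (1 if r < rows - 1 else 0) for r in range(rows)]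
--     col_deg = [(1 if c > 0 else 0) + (1 if c < cols - 1 else 0) for c in range(cols)]
--     return [[rd + cd for cd in col_deg] for rd in row_deg]
-- ===== Notes on version B (the rewrite author's own statement) =====
-- stated objective: simpler
-- what changed: B precomputes 1D row/col neighbor-degree tables and fills each cell as row_deg[r]+col_deg[c], removing A's per-cell [-1,1] boundary-check loop.
import Mathlib
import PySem

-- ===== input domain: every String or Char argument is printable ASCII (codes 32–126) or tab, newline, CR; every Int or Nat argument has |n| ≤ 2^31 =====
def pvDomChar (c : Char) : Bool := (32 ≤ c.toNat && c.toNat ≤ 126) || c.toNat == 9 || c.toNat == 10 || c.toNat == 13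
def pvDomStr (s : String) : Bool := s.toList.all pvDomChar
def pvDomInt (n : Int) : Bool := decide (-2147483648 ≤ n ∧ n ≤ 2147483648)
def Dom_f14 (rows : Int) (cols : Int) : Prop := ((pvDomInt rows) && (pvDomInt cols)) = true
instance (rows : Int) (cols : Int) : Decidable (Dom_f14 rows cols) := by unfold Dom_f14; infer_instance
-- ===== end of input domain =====

-- B replaces A's per-cell [-1,1] boundary-check loop by precomputed 1D row/col degree tables
-- combined per cell (simpler decomposition, same asymptotic cost).


-- ===== PORT A =====
def f14 (rows : Int) (cols : Int) : List (List Int) :=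
  (PySem.List.pyRange 0 rows 1).foldl (fun outerarray r =>
    outerarray ++ [
      (PySem.List.pyRange 0 cols 1).foldl (fun innerarray c =>
        innerarray ++ [
          ([-1, 1] : List Int).foldl (fun cnt i =>
            let cnt := if r + i ≥ 0 ∧ r + i < rows then cnt + 1 else cnt
            if c + i ≥ 0 ∧ c + i < cols then cnt + 1 else cnt) 0
        ]) []
    ]) []

-- ===== PORT B =====
def f14_alt (rows : Int) (cols : Int) : List (List Int) :=
  if rows ≤ 0 then [] else
  let rowDeg : List Int := (PySem.List.pyRange 0 rows 1).map
    (fun r => (if r > 0 then (1 : Int) else 0) + (if r < rows - 1 then 1 else 0))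
  let colDeg : List Int := (PySem.List.pyRange 0 cols 1).map
    (fun c => (if c > 0 then (1 : Int) else 0) + (if c < cols - 1 then 1 else 0))
  rowDeg.map (fun rd => colDeg.map (fun cd => rd + cd))

-- ===== PRECONDITION & SPEC =====
def Spec_f14 (rows : Int) (cols : Int) (out : List (List Int)) : Prop := out = f14_alt rows cols
instance (rows : Int) (cols : Int) (out : List (List Int)) : Decidable (Spec_f14 rows cols out) := by unfold Spec_f14; infer_instance

-- ===== CLAIM (what is proved, stated in full; the proofs are below) =====
def Claim_equal_f14 : Prop := ∀ (rows : Int) (cols : Int), Dom_f14 rows cols → Spec_f14 rows cols (f14 rows cols)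

-- ===== LEMMAS AND PROOFS =====
theorem f14_inner (rows cols r : Int) (hr0 : 0 ≤ r) (hr : r < rows) :
    (PySem.List.pyRange 0 cols 1).foldl (fun innerarray c =>
        innerarray ++ [
          ([-1, 1] : List Int).foldl (fun cnt i =>
            let cnt := if r + i ≥ 0 ∧ r + i < rows then cnt + 1 else cnt
            if c + i ≥ 0 ∧ c + i < cols then cnt + 1 else cnt) 0
        ]) [] =
    (PySem.List.pyRange 0 cols 1).map
      (fun c => ((if r > 0 then (1 : Int) else 0) + (if r < rows - 1 then 1 else 0)) +
                ((if c > 0 then (1 : Int) else 0) + (if c < cols - 1 then 1 else 0))) := by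
  rw [PySem.List.foldl_append_singleton_eq_map, List.nil_append]
  apply List.map_congr_left
  intro c hc
  rw [PySem.List.mem_pyRange_one] at hc
  simp only [List.foldl_cons, List.foldl_nil]
  split_ifs <;> omega

-- ===== VERDICT (by name: the statement is the Claim_ definition above) =====
theorem f14_spec : Claim_equal_f14 := by
  intro rows cols _
  unfold Spec_f14 f14 f14_alt
  by_cases h : rows ≤ 0
  · simp [PySem.List.pyRange_one_eq_nil h, h]
  rw [if_neg h]
  rw [PySem.List.foldl_append_singleton_eq_map, List.nil_append, List.map_map]
  apply List.map_congr_left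
  intro r hr
  rw [PySem.List.mem_pyRange_one] at hr
  simpa using f14_inner rows cols r hr.1 hr.2
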